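-- pv_equiv track=rewrite | github.com/Dohny42/advent-of-code | src/day_3.py | get_max_data
-- ===== SOURCE A (Python) =====
-- def get_max_data(line: str, skip: list[int]) -> tuple[int, int]:
--     max_digit = -1
--     max_idx = -1
--     for idx, char in enumerate(line):
--         curr = int(char)
--         if curr > max_digit:
--             max_digit = curr
--             max_idx = idx
--     return max_digit, max_idx
-- ===== SOURCE B (Python) =====
-- def get_max_data(line: str, skip: list[int]) -> tuple[int, int]:
--     digits = [int(c) for c in line]
--     if not digits:
--         return -1, -1
--     m = max(digits)
--     return m, digits.index(m)
-- ===== Notes on version B (the rewrite author's own statement) =====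
-- stated objective: idiomatic
-- what changed: Replaces the hand-rolled running-max loop with the standard max()+list.index() idiom on the list of digits, relying on index() for A's first-occurrence tie-breaking.
import Mathlib
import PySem

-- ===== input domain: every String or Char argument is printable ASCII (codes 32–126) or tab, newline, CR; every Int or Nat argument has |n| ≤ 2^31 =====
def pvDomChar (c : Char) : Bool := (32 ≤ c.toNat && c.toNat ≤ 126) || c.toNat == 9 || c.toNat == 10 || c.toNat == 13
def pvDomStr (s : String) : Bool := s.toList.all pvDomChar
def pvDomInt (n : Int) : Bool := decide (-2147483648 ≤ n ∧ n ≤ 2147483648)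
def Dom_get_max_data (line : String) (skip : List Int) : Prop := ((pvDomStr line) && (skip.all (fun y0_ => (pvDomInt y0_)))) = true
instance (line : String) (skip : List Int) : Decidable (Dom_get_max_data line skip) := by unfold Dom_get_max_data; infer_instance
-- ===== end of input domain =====

-- B replaces A's hand-rolled running-max loop by the max()+index() idiom on the digit list (same O(n) cost, more idiomatic).


-- ===== PORT A =====
-- int(char) for a single character; Python raises ValueError when ofChars? is none —
-- those inputs are excluded by Pre_ below, the .getD 0 totalization is never reached there.
def pvDigitVal (c : Char) : Int := (PySem.Int.ofChars? [c]).getD 0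

def get_max_data (line : String) (skip : List Int) : Int × Int :=
  (PySem.List.enumerate line.toList 0).foldl
    (fun (st : Int × Int) (p : Int × Char) =>
      let curr := pvDigitVal p.2
      if curr > st.1 then (curr, p.1) else st)
    (-1, -1)

-- ===== PORT B =====
def get_max_data_alt (line : String) (skip : List Int) : Int × Int :=
  let digits := line.toList.map pvDigitVal
  if digits = [] then (-1, -1)
  else
    let m := (PySem.List.max? digits (fun x => x)).getD 0
    (m, (((PySem.List.index? digits m).getD 0 : Nat) : Int))

-- ===== PRECONDITION & SPEC =====
-- Pre_ excludes exactly the inputs where int(char) raises ValueError in both A and B: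
-- any line containing a non-digit character.
def Pre_get_max_data (line : String) (skip : List Int) : Prop :=
  line.toList.all Char.isDigit = true
instance (line : String) (skip : List Int) : Decidable (Pre_get_max_data line skip) := by
  unfold Pre_get_max_data; infer_instance

def pvWitness_get_max_data : String × List Int := ("3912", [0])

def Spec_get_max_data (line : String) (skip : List Int) (out : Int × Int) : Prop := out = get_max_data_alt line skip
instance (line : String) (skip : List Int) (out : Int × Int) : Decidable (Spec_get_max_data line skip out) := by unfold Spec_get_max_data; infer_instance

-- ===== CLAIM (what is proved, stated in full; the proofs are below) =====
def Claim_equal_get_max_data : Prop := ∀ (line : String) (skip : List Int), Dom_get_max_data line skip → Pre_get_max_data line skip → Spec_get_max_data line skip (get_max_data line skip)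

-- ===== LEMMAS AND PROOFS =====

theorem char_eq_of_toNat {c d : Char} (h : c.val.toNat = d.val.toNat) : c = d :=
  Char.ext (UInt32.toNat_inj.mp h)

theorem digit_cases (c : Char) (h : c.isDigit) :
    c ∈ ['0','1','2','3','4','5','6','7','8','9'] := by
  simp [Char.isDigit] at h
  obtain ⟨h1, h2⟩ := h
  have h1' : 48 ≤ c.val.toNat := h1
  have h2' : c.val.toNat ≤ 57 := h2
  have hd : c.val.toNat = 48 ∨ c.val.toNat = 49 ∨ c.val.toNat = 50 ∨ c.val.toNat = 51 ∨
      c.val.toNat = 52 ∨ c.val.toNat = 53 ∨ c.val.toNat = 54 ∨ c.val.toNat = 55 ∨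
      c.val.toNat = 56 ∨ c.val.toNat = 57 := by omega
  rcases hd with h|h|h|h|h|h|h|h|h|h <;>
  first
    | (rw [char_eq_of_toNat (d := '0') h]; decide)
    | (rw [char_eq_of_toNat (d := '1') h]; decide)
    | (rw [char_eq_of_toNat (d := '2') h]; decide)
    | (rw [char_eq_of_toNat (d := '3') h]; decide)
    | (rw [char_eq_of_toNat (d := '4') h]; decide)
    | (rw [char_eq_of_toNat (d := '5') h]; decide)
    | (rw [char_eq_of_toNat (d := '6') h]; decide)
    | (rw [char_eq_of_toNat (d := '7') h]; decide)
    | (rw [char_eq_of_toNat (d := '8') h]; decide)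
    | (rw [char_eq_of_toNat (d := '9') h]; decide)

theorem dval_digit_nonneg (c : Char) (h : c.isDigit) : 0 ≤ pvDigitVal c := by
  have hm := digit_cases c h
  fin_cases hm <;> decide

theorem foldl_max_cons (t : List Int) (d x : Int) :
    t.foldl max (max d x) = max d (t.foldl max x) := by
  induction t generalizing x with
  | nil => rfl
  | cons y t' ih =>
      simp only [List.foldl_cons, max_assoc]
      exact ih (max x y)

-- the running-max fold of A characterised by Python's max (first maximal) and first index
theorem fold_char (l : List Char) (i m j : Int) :
    (PySem.List.enumerate l i).foldl
      (fun (st : Int × Int) (p : Int × Char) =>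
        let curr := pvDigitVal p.2
        if curr > st.1 then (curr, p.1) else st) (m, j)
    = match PySem.List.max? (l.map pvDigitVal) (fun x => x) with
      | none => (m, j)
      | some M =>
          if m < M then (M, i + (((PySem.List.index? (l.map pvDigitVal) M).getD 0 : Nat) : Int))
          else (m, j) := by
  induction l generalizing i m j with
  | nil => simp [PySem.List.enumerate_nil, PySem.List.max?]
  | cons c t ih =>
      rw [PySem.List.enumerate_cons, List.foldl_cons]
      simp only [List.map_cons]
      rw [PySem.List.max?_id_cons]
      by_cases hdm : pvDigitVal c > m
      · simp only [hdm, if_pos]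
        rw [ih (i + 1) (pvDigitVal c) i]
        cases hcase : PySem.List.max? (t.map pvDigitVal) (fun x => x) with
        | none =>
            have h0 : t.map pvDigitVal = [] := (PySem.List.max?_eq_none_iff _ _).mp hcase
            rw [h0]
            dsimp only
            simp only [List.foldl_nil]
            rw [if_pos hdm, PySem.List.index?_cons_self]
            simp
        | some M =>
            have hne : t.map pvDigitVal ≠ [] := by
              intro h0
              rw [(PySem.List.max?_eq_none_iff _ _).mpr h0] at hcase
              simp at hcase
            obtain ⟨x, t', hxt⟩ := List.exists_cons_of_ne_nil hne
            have hM : M = t'.foldl max x := by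
              rw [hxt, PySem.List.max?_id_cons] at hcase
              exact (Option.some_inj.mp hcase).symm
            have hfold : (t.map pvDigitVal).foldl max (pvDigitVal c) = max (pvDigitVal c) M := by
              rw [hxt, List.foldl_cons, foldl_max_cons, hM]
            rw [hfold]
            have hmem : M ∈ t.map pvDigitVal := PySem.List.max?_mem hcase
            obtain ⟨k, hk⟩ : ∃ k, PySem.List.index? (t.map pvDigitVal) M = some k :=
              Option.isSome_iff_exists.mp ((PySem.List.index?_isSome_iff _ _).mpr hmem)
            have hcond : m < max (pvDigitVal c) M := lt_of_lt_of_le hdm (le_max_left _ M)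
            dsimp only
            rw [if_pos hcond]
            by_cases hdM : pvDigitVal c < M
            · rw [if_pos hdM]
              have hmax : max (pvDigitVal c) M = M := max_eq_right (le_of_lt hdM)
              rw [hmax]
              have hne2 : pvDigitVal c ≠ M := ne_of_lt hdM
              rw [PySem.List.index?_cons_of_ne _ hne2, hk]
              simp only [Option.map_some, Option.getD_some, Prod.mk.injEq]
              refine ⟨trivial, by push_cast; ring⟩
            · rw [if_neg hdM]
              have hmax : max (pvDigitVal c) M = pvDigitVal c := max_eq_left (le_of_not_gt hdM)
              rw [hmax, PySem.List.index?_cons_self]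
              simp
      · rw [if_neg hdm]
        rw [ih (i + 1) m j]
        have hdm' : pvDigitVal c ≤ m := le_of_not_gt hdm
        cases hcase : PySem.List.max? (t.map pvDigitVal) (fun x => x) with
        | none =>
            have h0 : t.map pvDigitVal = [] := (PySem.List.max?_eq_none_iff _ _).mp hcase
            rw [h0]
            dsimp only
            simp only [List.foldl_nil]
            rw [if_neg (not_lt.mpr hdm')]
        | some M =>
            have hne : t.map pvDigitVal ≠ [] := by
              intro h0
              rw [(PySem.List.max?_eq_none_iff _ _).mpr h0] at hcase
              simp at hcase
            obtain ⟨x, t', hxt⟩ := List.exists_cons_of_ne_nil hne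
            have hM : M = t'.foldl max x := by
              rw [hxt, PySem.List.max?_id_cons] at hcase
              exact (Option.some_inj.mp hcase).symm
            have hfold : (t.map pvDigitVal).foldl max (pvDigitVal c) = max (pvDigitVal c) M := by
              rw [hxt, List.foldl_cons, foldl_max_cons, hM]
            rw [hfold]
            have hmem : M ∈ t.map pvDigitVal := PySem.List.max?_mem hcase
            obtain ⟨k, hk⟩ : ∃ k, PySem.List.index? (t.map pvDigitVal) M = some k :=
              Option.isSome_iff_exists.mp ((PySem.List.index?_isSome_iff _ _).mpr hmem)
            dsimp only
            by_cases hmM : m < M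
            · have hcond : m < max (pvDigitVal c) M := lt_of_lt_of_le hmM (le_max_right _ M)
              rw [if_pos hcond, if_pos hmM]
              have hmax : max (pvDigitVal c) M = M := max_eq_right (le_trans hdm' (le_of_lt hmM))
              rw [hmax]
              have hne2 : pvDigitVal c ≠ M := ne_of_lt (lt_of_le_of_lt hdm' hmM)
              rw [PySem.List.index?_cons_of_ne _ hne2, hk]
              simp only [Option.map_some, Option.getD_some, Prod.mk.injEq]
              refine ⟨trivial, by push_cast; ring⟩
            · have hcond : ¬ m < max (pvDigitVal c) M := by
                rw [not_lt] at hmM ⊢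
                exact max_le hdm' hmM
              rw [if_neg hcond, if_neg hmM]

-- ===== VERDICT (by name: the statement is the Claim_ definition above) =====
theorem get_max_data_spec : Claim_equal_get_max_data := by
  intro line skip _hdom hpre
  unfold Spec_get_max_data get_max_data get_max_data_alt
  rw [fold_char line.toList 0 (-1) (-1)]
  cases hcase : PySem.List.max? (line.toList.map pvDigitVal) (fun x => x) with
  | none =>
      have h0 : line.toList.map pvDigitVal = [] := (PySem.List.max?_eq_none_iff _ _).mp hcase
      simp [h0]
  | some M =>
      have hne : line.toList.map pvDigitVal ≠ [] := by
        intro h0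
        rw [(PySem.List.max?_eq_none_iff _ _).mpr h0] at hcase
        simp at hcase
      have hmem : M ∈ line.toList.map pvDigitVal := PySem.List.max?_mem hcase
      have hMnn : 0 ≤ M := by
        obtain ⟨c, hc, hcv⟩ := List.mem_map.mp hmem
        have hd : c.isDigit := by
          have := List.all_eq_true.mp hpre c hc
          simpa using this
        rw [← hcv]
        exact dval_digit_nonneg c hd
      dsimp only
      rw [if_pos (by omega : (-1 : Int) < M)]
      simp [hne, hcase]
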